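-- pv_equiv track=rewrite | github.com/bl4drnnr/python-prolog-Interpreter-lib | ppil/query/rule_query.py | answer_handler
-- ===== SOURCE A (Python) =====
-- def answer_handler(answer):
--     if len(answer) == 0:
--         answer.append("No")
--         return answer
--
--     elif len(answer) > 1:
--         if any(ans != "Yes" for ans in answer):
--             answer = [i for i in answer if i != "Yes"]
--         elif all(ans == "Yes" for ans in answer):
--             return answer_handler([])
--
--     return answer
-- ===== SOURCE B (Python) =====
-- def answer_handler(answer):
--     if len(answer) == 0:
--         answer.append("No")
--         return answer
--     if len(answer) == 1:
--         return answer
--     result = list(answer)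
--     while "Yes" in result:
--         result.remove("Yes")
--     if not result:
--         result.append("No")
--     return result
-- ===== Notes on version B (the rewrite author's own statement) =====
-- stated objective: alternative
-- what changed: Replaces A's any()/all() scans, list comprehension and recursive call into answer_handler([]) with a destructive loop that repeatedly list.remove()s the first 'Yes' from a working copy until none remain, then appends 'No' in place if the copy emptied.
import Mathlib
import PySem

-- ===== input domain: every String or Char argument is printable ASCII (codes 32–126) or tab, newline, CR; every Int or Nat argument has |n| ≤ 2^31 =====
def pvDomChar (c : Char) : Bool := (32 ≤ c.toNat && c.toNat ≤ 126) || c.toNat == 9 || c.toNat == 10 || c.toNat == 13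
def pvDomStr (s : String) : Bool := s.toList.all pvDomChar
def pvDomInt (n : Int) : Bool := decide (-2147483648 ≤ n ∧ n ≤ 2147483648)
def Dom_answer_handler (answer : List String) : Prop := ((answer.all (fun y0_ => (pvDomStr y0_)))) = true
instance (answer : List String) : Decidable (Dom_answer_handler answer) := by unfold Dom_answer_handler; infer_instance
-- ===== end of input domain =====

-- ===== PORT A =====
-- B rebuilds the len>1 result by repeatedly removing the first "Yes" from a copy; on empty input both mutate the argument (append "No") — equivalence here is about the return value.
def answer_handler (answer : List String) : List String :=
  if answer.length = 0 then answer ++ ["No"]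
  else if answer.length > 1 then
    if answer.any (fun ans => ans != "Yes") then
      answer.filter (fun i => i != "Yes")
    else if answer.all (fun ans => ans == "Yes") then
      answer_handler []
    else answer
  else answer
termination_by answer.length
decreasing_by simp_all; omega

-- ===== PORT B =====
-- the `while "Yes" in result: result.remove("Yes")` loop; list.remove = List.erase (first occurrence)
def removeLoop (result : List String) : List String :=
  if "Yes" ∈ result then removeLoop (result.erase "Yes") else result
termination_by result.length
decreasing_by
  have h1 := List.length_erase_of_mem (a := "Yes") (l := result) (by assumption)
  have h2 := List.length_pos_of_mem (by assumption : "Yes" ∈ result)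
  omega

def answer_handler_alt (answer : List String) : List String :=
  if answer.length = 0 then answer ++ ["No"]
  else if answer.length = 1 then answer
  else
    let result := removeLoop answer
    if result.isEmpty then result ++ ["No"] else result

-- ===== PRECONDITION & SPEC =====
def Spec_answer_handler (answer : List String) (out : List String) : Prop := out = answer_handler_alt answer
instance (answer : List String) (out : List String) : Decidable (Spec_answer_handler answer out) := by unfold Spec_answer_handler; infer_instance

-- ===== CLAIM (what is proved, stated in full; the proofs are below) =====
def Claim_equal_answer_handler : Prop := ∀ (answer : List String), Dom_answer_handler answer → Spec_answer_handler answer (answer_handler answer)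

-- ===== LEMMAS AND PROOFS =====

theorem removeLoop_eq_filter (l : List String) :
    removeLoop l = l.filter (fun i => i != "Yes") := by
  by_cases h : "Yes" ∈ l
  · rw [removeLoop, if_pos h, removeLoop_eq_filter (l.erase "Yes")]
    induction l with
    | nil => simp
    | cons a t ih =>
      by_cases ha : a = "Yes"
      · simp [ha]
      · have : ("Yes" : String) ∈ t := by
          rcases List.mem_cons.mp h with h1 | h1
          · exact absurd h1.symm ha
          · exact h1
        simp [ha, ih this]
  · rw [removeLoop, if_neg h]
    symm
    apply List.filter_eq_self.mpr
    intro x hx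
    simp only [bne_iff_ne, ne_eq]
    intro hx'
    exact h (hx' ▸ hx)
termination_by l.length
decreasing_by
  have h1 := List.length_erase_of_mem (a := "Yes") (l := l) h
  have h2 := List.length_pos_of_mem h
  omega

theorem filter_empty_iff_not_any (answer : List String) :
    (answer.filter (fun i => i != "Yes")).isEmpty = !(answer.any (fun ans => ans != "Yes")) := by
  induction answer with
  | nil => simp
  | cons a l ih =>
    by_cases h : a = "Yes" <;> simp [h, ih]

-- ===== VERDICT (by name: the statement is the Claim_ definition above) =====
theorem answer_handler_spec : Claim_equal_answer_handler := by
  intro answer _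
  unfold Spec_answer_handler answer_handler answer_handler_alt
  rcases answer with _ | ⟨a, _ | ⟨b, l⟩⟩
  · simp
  · simp
  · simp only [List.length_cons, removeLoop_eq_filter]
    rw [if_neg (by omega : ¬ l.length + 1 + 1 = 0), if_pos (by omega : l.length + 1 + 1 > 1),
        if_neg (by omega : ¬ l.length + 1 + 1 = 0), if_neg (by omega : ¬ l.length + 1 + 1 = 1)]
    by_cases hany : (a :: b :: l).any (fun ans => ans != "Yes") = true
    · rw [if_pos hany]
      have : ((a :: b :: l).filter (fun i => i != "Yes")).isEmpty = false := by
        rw [filter_empty_iff_not_any, hany]; rfl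
      simp [this]
    · have hall : (a :: b :: l).all (fun ans => ans == "Yes") = true := by
        simp only [List.any_eq_true, not_exists, not_and] at hany
        simp only [List.all_eq_true]
        intro x hx
        have := hany x hx
        simpa using this
      have he : ((a :: b :: l).filter (fun i => i != "Yes")).isEmpty = true := by
        rw [filter_empty_iff_not_any]
        simp [hany]
      have hf : (a :: b :: l).filter (fun i => i != "Yes") = [] := List.isEmpty_iff.mp he
      rw [if_neg hany, if_pos hall, if_pos he, hf]
      simp [answer_handler]
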